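-- pv_equiv track=rewrite | github.com/Achim-cn/RL | emb/feat_tag_vec.py | machine_tag
-- ===== SOURCE A (Python) =====
-- def machine_tag(x):
--     if len(x) < 1:
--         return ''
--     else:
--         machine_tag_ = []
--         word_weight = x.split(';')[:-1]
--         for item in word_weight:
--             tmp = item.split(" ")
--             machine_tag_.append(tmp[0])
--         return ";".join(machine_tag_)
-- ===== SOURCE B (Python) =====
-- def machine_tag(x):
--     # One pass over the characters: copy the first word of each ';'-terminated
--     # segment directly into the output; no split, no intermediate lists.
--     out = ""
--     word = ""
--     in_word = True
--     seen = False
--     for c in x: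
--         if c == ';':
--             if seen:
--                 out += ';'
--             out += word
--             word = ""
--             in_word = True
--             seen = True
--         elif in_word:
--             if c == ' ':
--                 in_word = False
--             else:
--                 word += c
--     return out
-- ===== Notes on version B (the rewrite author's own statement) =====
-- stated objective: alternative
-- what changed: Replaced the split-on-';' pass plus per-item split-on-' ' with a single character scan that copies each segment's first word straight into the output via a small state machine.
import Mathlib
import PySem

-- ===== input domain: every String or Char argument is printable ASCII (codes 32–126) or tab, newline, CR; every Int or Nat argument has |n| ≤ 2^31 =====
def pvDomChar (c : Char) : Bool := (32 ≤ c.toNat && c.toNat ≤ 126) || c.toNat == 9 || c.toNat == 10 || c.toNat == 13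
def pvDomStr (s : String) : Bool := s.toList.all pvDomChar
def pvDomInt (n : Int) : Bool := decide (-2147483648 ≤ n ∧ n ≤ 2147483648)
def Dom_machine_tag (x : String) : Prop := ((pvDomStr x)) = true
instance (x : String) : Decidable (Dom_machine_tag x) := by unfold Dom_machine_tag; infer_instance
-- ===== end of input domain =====

-- B replaces A's two split passes (split on ';' then split each item on ' ') by a single
-- character scan with a small state machine; alternative algorithm, same asymptotic cost.



-- ===== PORT A =====
-- split? is `some` because both separator literals are nonempty; tmp[0] never raises
-- because str.split always returns a nonempty list, so the `.getD` defaults are never taken.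
def machine_tag (x : String) : String :=
  if PySem.Str.len x < 1 then ""
  else
    let word_weight := PySem.List.slice ((PySem.Str.split? x ";").getD []) none (some (-1))
    let machine_tag_ := word_weight.foldl (fun acc item =>
      let tmp := (PySem.Str.split? item " ").getD []
      acc ++ [(PySem.List.pyGet? tmp 0).getD ""]) []
    PySem.Str.join ";" machine_tag_

-- ===== PORT B =====
-- state = (out, word, in_word, seen): exactly Source B's four loop variables
def mtStep (st : List Char × List Char × Bool × Bool) (c : Char) :
    List Char × List Char × Bool × Bool :=
  let (out, word, inWord, seen) := st
  if c = ';' then (out ++ (if seen then [';'] else []) ++ word, [], true, true)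
  else if inWord then
    if c = ' ' then (out, word, false, seen)
    else (out, word ++ [c], true, seen)
  else (out, word, inWord, seen)

def machine_tag_alt (x : String) : String :=
  String.ofList (x.toList.foldl mtStep ([], [], true, false)).1

-- ===== PRECONDITION & SPEC =====
def Spec_machine_tag (x : String) (out : String) : Prop := out = machine_tag_alt x
instance (x : String) (out : String) : Decidable (Spec_machine_tag x out) := by unfold Spec_machine_tag; infer_instance

-- ===== CLAIM (what is proved, stated in full; the proofs are below) =====
def Claim_equal_machine_tag : Prop := ∀ (x : String), Dom_machine_tag x → Spec_machine_tag x (machine_tag x)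

-- ===== LEMMAS AND PROOFS =====

def pvSegs (s : Char) : List Char → List (List Char)
  | [] => [[]]
  | c :: l => if c = s then [] :: pvSegs s l else (pvSegs s l).modifyHead (c :: ·)

theorem pvSegs_ne_nil (s : Char) (l : List Char) : pvSegs s l ≠ [] := by
  induction l with
  | nil => simp [pvSegs]
  | cons c l ih =>
    simp only [pvSegs]
    split
    · simp
    · cases hE : pvSegs s l with
      | nil => exact absurd hE ih
      | cons a t => simp [List.modifyHead]

theorem pvSegs_go (s : Char) :
    ∀ (l : List Char) (fuel : Nat) (cur : List Char) (acc : List (List Char)),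
      l.length < fuel →
      PySem.Chars.splitOn.go [s] fuel l cur acc
        = acc.reverse ++ (pvSegs s l).modifyHead (cur.reverse ++ ·) := by
  intro l
  induction l with
  | nil =>
    intro fuel cur acc h
    cases fuel with
    | zero => omega
    | succ f => simp [PySem.Chars.splitOn.go, pvSegs, List.modifyHead]
  | cons c l ih =>
    intro fuel cur acc h
    cases fuel with
    | zero => omega
    | succ f =>
      by_cases hcs : s = c
      · subst hcs
        rw [PySem.Chars.splitOn.go]
        simp only [List.isPrefixOf, beq_self_eq_true, Bool.true_and, if_pos, List.length_singleton,
          List.drop_succ_cons, List.drop_zero]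
        rw [ih f [] (cur.reverse :: acc) (by simp at h; omega)]
        have hne := pvSegs_ne_nil s l
        cases hE : pvSegs s l with
        | nil => exact absurd hE hne
        | cons a t => simp [pvSegs, hE, List.modifyHead]
      · rw [PySem.Chars.splitOn.go]
        have hpre : ([s].isPrefixOf (c :: l)) = false := by
          simpa [List.isPrefixOf] using hcs
        rw [hpre]
        simp only [Bool.false_eq_true, if_false]
        rw [ih f (c :: cur) acc (by simp at h ⊢; omega)]
        have hne := pvSegs_ne_nil s l
        cases hE : pvSegs s l with
        | nil => exact absurd hE hne
        | cons a t =>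
          rw [pvSegs, hE, if_neg (fun hh => hcs hh.symm)]
          simp [List.modifyHead]

theorem splitOn_eq_pvSegs (s : Char) (l : List Char) :
    PySem.Chars.splitOn l [s] = pvSegs s l := by
  rw [PySem.Chars.splitOn, pvSegs_go s l (l.length + 1) [] [] (by omega)]
  have hne := pvSegs_ne_nil s l
  cases hE : pvSegs s l with
  | nil => exact absurd hE hne
  | cons a t => simp [List.modifyHead]


def pvFW (cs : List Char) : List Char := cs.takeWhile (fun c => c != ' ')

def pvWords (pend : List Char) (inWord : Bool) (l : List Char) : List (List Char) :=
  match (pvSegs ';' l).dropLast with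
  | [] => []
  | s :: rest => (if inWord then pend ++ pvFW s else pend) :: rest.map pvFW

def pvEmit (seen : Bool) : List (List Char) → List Char
  | [] => []
  | w :: ws => (if seen then [';'] else []) ++ w ++ pvEmit true ws

theorem pvWords_nil_true (l : List Char) :
    pvWords [] true l = ((pvSegs ';' l).dropLast).map pvFW := by
  unfold pvWords
  cases (pvSegs ';' l).dropLast <;> simp

theorem pvWords_semi (pend : List Char) (inWord : Bool) (l : List Char) :
    pvWords pend inWord (';' :: l) = pend :: pvWords [] true l := by
  rw [pvWords_nil_true]
  unfold pvWords
  rw [pvSegs, if_pos rfl, List.dropLast_cons_of_ne_nil (pvSegs_ne_nil ';' l)]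
  cases inWord <;> simp [pvFW]

theorem pvWords_space (pend : List Char) (l : List Char) :
    pvWords pend true (' ' :: l) = pvWords pend false l := by
  unfold pvWords
  rw [pvSegs, if_neg (by decide)]
  cases hE : pvSegs ';' l with
  | nil => exact absurd hE (pvSegs_ne_nil ';' l)
  | cons a t =>
    cases t with
    | nil => simp [List.modifyHead]
    | cons b t => simp [List.modifyHead, List.dropLast_cons_of_ne_nil, pvFW]

theorem pvWords_char (pend : List Char) (c : Char) (l : List Char)
    (hc : ¬ c = ';') (hs : ¬ c = ' ') :
    pvWords (pend ++ [c]) true l = pvWords pend true (c :: l) := by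
  unfold pvWords
  rw [pvSegs, if_neg hc]
  cases hE : pvSegs ';' l with
  | nil => exact absurd hE (pvSegs_ne_nil ';' l)
  | cons a t =>
    cases t with
    | nil => simp [List.modifyHead]
    | cons b t => simp [List.modifyHead, List.dropLast_cons_of_ne_nil, pvFW, hs]

theorem pvWords_skip (pend : List Char) (c : Char) (l : List Char) (hc : ¬ c = ';') :
    pvWords pend false (c :: l) = pvWords pend false l := by
  unfold pvWords
  rw [pvSegs, if_neg hc]
  cases hE : pvSegs ';' l with
  | nil => exact absurd hE (pvSegs_ne_nil ';' l)
  | cons a t =>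
    cases t with
    | nil => simp [List.modifyHead]
    | cons b t => simp [List.modifyHead, List.dropLast_cons_of_ne_nil]

theorem mt_fold_spec :
    ∀ (l out word : List Char) (inWord seen : Bool),
      (l.foldl mtStep (out, word, inWord, seen)).1
        = out ++ pvEmit seen (pvWords word inWord l) := by
  intro l
  induction l with
  | nil =>
    intro out word inWord seen
    unfold pvWords
    cases hE : pvSegs ';' [] with
    | nil => exact absurd hE (pvSegs_ne_nil ';' [])
    | cons a t =>
      simp [pvSegs] at hE
      simp [hE.1, hE.2, pvEmit]
  | cons c l ih =>
    intro out word inWord seen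
    rw [List.foldl_cons]
    by_cases hc : c = ';'
    · subst hc
      show ((l.foldl mtStep (out ++ (if seen then [';'] else []) ++ word, [], true, true))).1 = _
      rw [ih, pvWords_semi, pvEmit]
      simp
    · by_cases hw : inWord = true
      · subst hw
        by_cases hs : c = ' '
        · subst hs
          show ((l.foldl mtStep (out, word, false, seen))).1 = _
          rw [ih, pvWords_space]
        · have hstep : mtStep (out, word, true, seen) c = (out, word ++ [c], true, seen) := by
            simp [mtStep, hc, hs]
          rw [hstep, ih, pvWords_char word c l hc hs]
      · replace hw : inWord = false := by simpa using hw
        subst hw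
        have hstep : mtStep (out, word, false, seen) c = (out, word, false, seen) := by
          simp [mtStep, hc]
        rw [hstep, ih, pvWords_skip word c l hc]

theorem pvEmit_true_flatten (ws : List (List Char)) :
    pvEmit true ws = (ws.map (fun w => ';' :: w)).flatten := by
  induction ws with
  | nil => simp [pvEmit]
  | cons w ws ih => simp [pvEmit, ih]

theorem pvEmit_false_intercalate (L : List (List Char)) :
    pvEmit false L = List.intercalate [';'] L := by
  cases L with
  | nil => simp [pvEmit, List.intercalate]
  | cons w ws =>
    rw [pvEmit, pvEmit_true_flatten]
    induction ws generalizing w with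
    | nil => simp [List.intercalate]
    | cons v vs ih => simp [List.intercalate, List.intersperse] at ih ⊢; simp [ih]

theorem pvSegs_headD (s : Char) (cs : List Char) :
    (pvSegs s cs).headD [] = cs.takeWhile (fun c => c != s) := by
  induction cs with
  | nil => simp [pvSegs]
  | cons c cs ih =>
    simp only [pvSegs]
    by_cases h : c = s
    · simp [h]
    · cases hE : pvSegs s cs with
      | nil => exact absurd hE (pvSegs_ne_nil s cs)
      | cons a t =>
        rw [hE] at ih
        simp only [List.headD_cons] at ih
        simp [List.modifyHead, List.takeWhile_cons, h, ← ih]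


theorem machine_tag_alt_eq (x : String) :
    machine_tag_alt x
      = String.ofList (List.intercalate [';']
          ((pvSegs ';' x.toList).dropLast.map pvFW)) := by
  rw [machine_tag_alt, mt_fold_spec, pvWords_nil_true, pvEmit_false_intercalate]
  simp

theorem split?_ofList (cs : List Char) (sep : Char) (hsep : (String.singleton sep).toList = [sep]) :
    PySem.Str.split? (String.ofList cs) (String.singleton sep)
      = some ((pvSegs sep cs).map String.ofList) := by
  rw [PySem.Str.split?, PySem.Chars.split?, hsep]
  simp [splitOn_eq_pvSegs]

theorem firstword_ofList (cs : List Char) :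
    (PySem.List.pyGet? ((PySem.Str.split? (String.ofList cs) " ").getD []) 0).getD ""
      = String.ofList (pvFW cs) := by
  have h := split?_ofList cs ' ' (by decide)
  rw [show (" " : String) = String.singleton ' ' from rfl] at *
  rw [h]
  cases hE : pvSegs ' ' cs with
  | nil => exact absurd hE (pvSegs_ne_nil ' ' cs)
  | cons a t =>
    have hh := pvSegs_headD ' ' cs
    rw [hE] at hh
    simp only [List.headD_cons] at hh
    simp [PySem.List.pyGet?, PySem.List.pyIdx?, pvFW, ← hh]

theorem machine_tag_eq (x : String) :
    machine_tag x
      = String.ofList (List.intercalate [';']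
          ((pvSegs ';' x.toList).dropLast.map pvFW)) := by
  rw [machine_tag]
  by_cases hx : x.toList = []
  · rw [if_pos (by simp [PySem.Str.len_eq, hx])]
    simp [hx, pvSegs, List.intercalate]
  · rw [if_neg (by simp [PySem.Str.len_eq]; exact fun h => hx (by simp [h]))]
    have h1 : PySem.Str.split? x ";" = some ((pvSegs ';' x.toList).map String.ofList) := by
      have h := split?_ofList x.toList ';' (by decide)
      rw [String.ofList_toList] at h
      rw [show (";" : String) = String.singleton ';' from rfl, h]
    rw [h1]
    simp only [Option.getD_some, PySem.List.slice_to_neg_one, ← List.map_dropLast]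
    rw [PySem.List.foldl_append_singleton_eq_map]
    rw [List.map_map]
    rw [List.nil_append,
      List.map_congr_left (fun cs _ => by
        simpa [Function.comp] using firstword_ofList cs)]
    rw [PySem.Str.join, PySem.Chars.join]
    simp [List.map_map, Function.comp_def]

-- ===== VERDICT (by name: the statement is the Claim_ definition above) =====
theorem machine_tag_spec : Claim_equal_machine_tag := by
  intro x _
  unfold Spec_machine_tag
  rw [machine_tag_eq, machine_tag_alt_eq]
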